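-- pv_equiv track=rewrite | github.com/jcolinpatrick/kryptos | scripts/grille/blitz_grille_geometry_v6.py | columnar_perm_by_key
-- ===== SOURCE A (Python) =====
-- def columnar_perm_by_key(text, col_key, width):
--     n = len(text)
--     n_rows = (n + width - 1) // width
--     col_order = sorted(range(width), key=lambda c: col_key[c])
--     sigma = []
--     for col in col_order:
--         for row in range(n_rows):
--             in_idx = row * width + col
--             if in_idx < n:
--                 sigma.append(in_idx)
--     return sigma
-- ===== SOURCE B (Python) =====
-- def columnar_perm_by_key(text, col_key, width):
--     n = len(text)
--     order = sorted(range(width), key=col_key.__getitem__)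
--     rank = {c: p for p, c in enumerate(order)}
--     # rank[i % width] groups indices column-major in key order; '* n + i'
--     # keeps rows ascending inside each column.
--     return sorted(range(n), key=lambda i: rank[i % width] * n + i)
-- ===== Notes on version B (the rewrite author's own statement) =====
-- stated objective: alternative
-- what changed: Replaces the explicit nested column/row emission loops (with a bounds check) by building a column-rank dictionary from the sorted column order and emitting the whole permutation with one stable sort of range(n) keyed by rank[i % width] * n + i.
-- outside the precondition, e.g. on columnar_perm_by_key('ab', [], -1): A returns [], B raises KeyError
import Mathlib
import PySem

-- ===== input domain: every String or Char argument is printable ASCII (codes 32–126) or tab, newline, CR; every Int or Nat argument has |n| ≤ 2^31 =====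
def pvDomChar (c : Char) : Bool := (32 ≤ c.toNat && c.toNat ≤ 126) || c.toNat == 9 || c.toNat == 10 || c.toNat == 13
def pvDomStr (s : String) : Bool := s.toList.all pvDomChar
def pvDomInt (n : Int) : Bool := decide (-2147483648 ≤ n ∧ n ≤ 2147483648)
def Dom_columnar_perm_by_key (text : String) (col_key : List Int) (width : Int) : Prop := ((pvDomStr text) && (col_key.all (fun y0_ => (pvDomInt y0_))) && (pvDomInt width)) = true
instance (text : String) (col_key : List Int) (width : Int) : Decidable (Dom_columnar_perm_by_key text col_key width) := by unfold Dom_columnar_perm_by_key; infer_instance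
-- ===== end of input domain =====

-- B replaces A's nested column/row emission loops by a rank dictionary and a single
-- key-sort of all indices (different decomposition, same cost class).


-- ===== PORT A =====
def columnar_perm_by_key (text : String) (col_key : List Int) (width : Int) : List Int :=
  let n : Int := PySem.Str.len text
  let n_rows : Int := PySem.Int.floordiv (n + width - 1) width
  -- col_key[c]: exact under Pre_ (0 ≤ c < width ≤ len col_key); out of range Python raises IndexError
  let col_order := PySem.List.sorted (PySem.List.pyRange 0 width 1)
      (fun c => PySem.List.pyGetD col_key c 0) false
  col_order.foldl (fun sigma col =>
    (PySem.List.pyRange 0 n_rows 1).foldl (fun sigma row =>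
      let in_idx := row * width + col
      if in_idx < n then sigma ++ [in_idx] else sigma) sigma) []

-- ===== PORT B =====
def columnar_perm_by_key_alt (text : String) (col_key : List Int) (width : Int) : List Int :=
  let n : Int := PySem.Str.len text
  let order := PySem.List.sorted (PySem.List.pyRange 0 width 1)
      (fun c => PySem.List.pyGetD col_key c 0) false
  let rank := (PySem.List.enumerate order 0).foldl
      (fun d pc => d.insert pc.2 pc.1) (PySem.Dict.empty : PySem.Dict Int Int)
  -- rank[i % width]: exact under Pre_ (the key 0 ≤ i % width < width is always present);
  -- on a missing key Python raises KeyError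
  PySem.List.sorted (PySem.List.pyRange 0 n 1)
      (fun i => (rank.get? (PySem.Int.mod i width)).getD 0 * n + i) false

-- ===== PRECONDITION & SPEC =====
-- A raises IndexError when width > len(col_key) and ZeroDivisionError when width = 0.
-- Pre_ also excludes width < 0 (outside the natural domain of a grille width): A's loops
-- there degenerate to returning [], while B's own dictionary lookup raises KeyError.
def Pre_columnar_perm_by_key (text : String) (col_key : List Int) (width : Int) : Prop :=
  1 ≤ width ∧ width ≤ (col_key.length : Int)
instance (text : String) (col_key : List Int) (width : Int) : Decidable (Pre_columnar_perm_by_key text col_key width) := by unfold Pre_columnar_perm_by_key; infer_instance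

def pvWitness_columnar_perm_by_key : String × List Int × Int := ("HELLOWORLD", [2, 0, 1], 3)

def Spec_columnar_perm_by_key (text : String) (col_key : List Int) (width : Int) (out : List Int) : Prop := out = columnar_perm_by_key_alt text col_key width
instance (text : String) (col_key : List Int) (width : Int) (out : List Int) : Decidable (Spec_columnar_perm_by_key text col_key width out) := by unfold Spec_columnar_perm_by_key; infer_instance

-- ===== CLAIM (what is proved, stated in full; the proofs are below) =====
def Claim_equal_columnar_perm_by_key : Prop := ∀ (text : String) (col_key : List Int) (width : Int), Dom_columnar_perm_by_key text col_key width → Pre_columnar_perm_by_key text col_key width → Spec_columnar_perm_by_key text col_key width (columnar_perm_by_key text col_key width)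

-- ===== LEMMAS AND PROOFS =====

-- The value stored in the rank dictionary at the q-th column of `ord` is q.
theorem pv_rank_get (ord : List Int) (hnd : ord.Nodup) (q : Nat) (hq : q < ord.length) :
    ((PySem.List.enumerate ord 0).foldl (fun d pc => d.insert pc.2 pc.1)
      (PySem.Dict.empty : PySem.Dict Int Int)).get? ord[q] = some (q : Int) := by
  set D := (PySem.List.enumerate ord 0).foldl (fun d pc => d.insert pc.2 pc.1)
      (PySem.Dict.empty : PySem.Dict Int Int) with hD
  have hkeys : D.keys.Nodup := by
    rw [hD]
    exact PySem.Dict.nodup_keys_foldl_insert_key (PySem.List.enumerate ord 0)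
      (fun pc : Int × Int => pc.2) (fun _ pc => pc.1) PySem.Dict.empty
      PySem.Dict.nodup_keys_empty
  have hitems : D.items = List.map (fun pc => (pc.2, pc.1)) (PySem.List.enumerate ord 0) := by
    rw [hD]
    have h := PySem.Dict.items_foldl_insert_fresh (PySem.List.enumerate ord 0)
      (fun pc => pc.2) (fun pc => pc.1) (PySem.Dict.empty : PySem.Dict Int Int)
      (fun a _ => by simp) (by rw [PySem.List.map_snd_enumerate]; exact hnd)
    simpa using h
  apply PySem.Dict.get?_of_mem_items D _ hkeys
  rw [hitems]
  have hql : q < (PySem.List.enumerate ord 0).length := by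
    rw [PySem.List.length_enumerate]; exact hq
  have : (PySem.List.enumerate ord 0)[q] = ((q : Int), ord[q]) := by
    rw [PySem.List.getElem_enumerate]; simp
  refine List.mem_map.2 ⟨(PySem.List.enumerate ord 0)[q], List.getElem_mem hql, ?_⟩
  rw [this]

-- A's nested loops append each column's surviving indices; folded out, one flatMap.
theorem pv_emit (n width nr : Int) (l : List Int) (acc : List Int) :
    (l.foldl (fun sigma col =>
      (PySem.List.pyRange 0 nr 1).foldl
        (fun sigma row =>
          if row * width + col < n then sigma ++ [row * width + col] else sigma) sigma) acc)
    = acc ++ l.flatMap (fun col =>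
        List.map (fun row => row * width + col)
          (List.filter (fun row => decide (row * width + col < n))
            (PySem.List.pyRange 0 nr 1))) := by
  induction l generalizing acc with
  | nil => simp
  | cons c t ih =>
    simp only [List.foldl_cons, List.flatMap_cons]
    rw [PySem.List.foldl_append_ite (fun row => row * width + c < n)
      (fun row => row * width + c) _ acc, ih]
    simp

-- Core: A's grouped emission over any ordering of the columns equals B's single
-- rank-keyed sort of range(n).
theorem pv_core (n width : Int) (ord : List Int) (hw : 1 ≤ width) (hn : 0 ≤ n)
    (hperm : ord.Perm (PySem.List.pyRange 0 width 1)) :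
    (ord.foldl (fun sigma col =>
      (PySem.List.pyRange 0 (PySem.Int.floordiv (n + width - 1) width) 1).foldl
        (fun sigma row =>
          if row * width + col < n then sigma ++ [row * width + col] else sigma) sigma) [])
    = PySem.List.sorted (PySem.List.pyRange 0 n 1)
        (fun i => (((PySem.List.enumerate ord 0).foldl (fun d pc => d.insert pc.2 pc.1)
            (PySem.Dict.empty : PySem.Dict Int Int)).get? (PySem.Int.mod i width)).getD 0
            * n + i) false := by
  set nr : Int := PySem.Int.floordiv (n + width - 1) width with hnr
  set D := (PySem.List.enumerate ord 0).foldl (fun d pc => d.insert pc.2 pc.1)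
      (PySem.Dict.empty : PySem.Dict Int Int) with hD
  set key : Int → Int := fun i => (D.get? (PySem.Int.mod i width)).getD 0 * n + i with hkeydef
  have hnd : ord.Nodup := hperm.symm.nodup (PySem.List.nodup_pyRange_one 0 width)
  have hmem_ord : ∀ c, c ∈ ord ↔ 0 ≤ c ∧ c < width := by
    intro c; rw [hperm.mem_iff, PySem.List.mem_pyRange_one]
  set g : Int → List Int := fun col =>
      List.map (fun row => row * width + col)
        (List.filter (fun row => decide (row * width + col < n))
          (PySem.List.pyRange 0 nr 1)) with hg
  have hA : ∀ acc : List Int,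
      (ord.foldl (fun sigma col =>
        (PySem.List.pyRange 0 nr 1).foldl
          (fun sigma row =>
            if row * width + col < n then sigma ++ [row * width + col] else sigma) sigma) acc)
      = acc ++ ord.flatMap g := fun acc => pv_emit n width nr ord acc
  -- key evaluates to rank * n + index on indices of column col
  have hkey : ∀ col row : Int, 0 ≤ col → col < width →
      key (row * width + col) = (D.get? col).getD 0 * n + (row * width + col) := by
    intro col row h0 h1
    have hm : PySem.Int.mod (row * width + col) width = col := by
      rw [PySem.Int.mod_eq_emod_of_pos (by omega)]
      have he : row * width + col = col + width * row := by ring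
      rw [he, Int.add_mul_emod_self_left, Int.emod_eq_of_lt h0 h1]
    rw [hkeydef]; simp only [hm]
  -- strict key-increase along A's emission order
  have hpw : (ord.flatMap g).Pairwise (fun a b => key a < key b) := by
    rw [List.pairwise_flatMap]
    constructor
    · intro col hcol
      obtain ⟨hc0, hcw⟩ := (hmem_ord col).1 hcol
      rw [hg, List.pairwise_map]
      apply List.Pairwise.filter
      apply (PySem.List.pairwise_lt_pyRange_one 0 nr).imp
      intro r r' hrr
      rw [hkey col r hc0 hcw, hkey col r' hc0 hcw]
      have : r * width < r' * width := by
        exact mul_lt_mul_of_pos_right hrr (by omega)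
      omega
    · rw [List.pairwise_iff_getElem]
      intro p q hp hq hpq x hx y hy
      obtain ⟨hp0, hpw'⟩ := (hmem_ord ord[p]).1 (List.getElem_mem hp)
      obtain ⟨hq0, hqw'⟩ := (hmem_ord ord[q]).1 (List.getElem_mem hq)
      rw [hg] at hx hy
      obtain ⟨rx, hrx, rfl⟩ := List.mem_map.1 hx
      obtain ⟨ry, hry, rfl⟩ := List.mem_map.1 hy
      rw [List.mem_filter] at hrx hry
      have hxlt : rx * width + ord[p] < n := by simpa using hrx.2
      have hry0 : 0 ≤ ry := ((PySem.List.mem_pyRange_one).1 hry.1).1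
      have hrx0 : 0 ≤ rx := ((PySem.List.mem_pyRange_one).1 hrx.1).1
      rw [hkey _ rx hp0 hpw', hkey _ ry hq0 hqw']
      rw [pv_rank_get ord hnd p hp, pv_rank_get ord hnd q hq]
      simp only [Option.getD_some]
      have hyge : 0 ≤ ry * width + ord[q] := by
        have := mul_nonneg hry0 (by omega : (0:Int) ≤ width); omega
      have h1 : ((p : Int) + 1) * n ≤ (q : Int) * n := by
        apply mul_le_mul_of_nonneg_right _ hn
        exact_mod_cast hpq
      nlinarith [hxlt, hyge, h1]
  have hndf : (ord.flatMap g).Nodup := by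
    apply hpw.imp
    intro a b h hab
    rw [hab] at h
    exact lt_irrefl _ h
  -- A's emission is a permutation of range(n)
  have hmemf : ∀ i : Int, i ∈ ord.flatMap g ↔ i ∈ PySem.List.pyRange 0 n 1 := by
    intro i
    rw [PySem.List.mem_pyRange_one, List.mem_flatMap]
    constructor
    · rintro ⟨col, hcol, hi⟩
      obtain ⟨hc0, hcw⟩ := (hmem_ord col).1 hcol
      rw [hg] at hi
      obtain ⟨row, hrow, rfl⟩ := List.mem_map.1 hi
      rw [List.mem_filter] at hrow
      have hr0 : 0 ≤ row := ((PySem.List.mem_pyRange_one).1 hrow.1).1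
      have hlt : row * width + col < n := by simpa using hrow.2
      have : 0 ≤ row * width := mul_nonneg hr0 (by omega)
      exact ⟨by omega, hlt⟩
    · rintro ⟨h0, hlt⟩
      have hwpos : (0 : Int) < width := by omega
      refine ⟨i % width, (hmem_ord _).2 ⟨Int.emod_nonneg i (by omega), Int.emod_lt_of_pos i hwpos⟩, ?_⟩
      have hdm : i / width * width + i % width = i := by
        have h := Int.ediv_add_emod i width
        linarith [mul_comm (i / width) width]
      rw [hg]
      refine List.mem_map.2 ⟨i / width, List.mem_filter.2 ⟨?_, by simp [hdm, hlt]⟩, hdm⟩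
      rw [PySem.List.mem_pyRange_one]
      refine ⟨Int.ediv_nonneg h0 (by omega), ?_⟩
      rw [hnr, PySem.Int.floordiv_eq_ediv_of_pos hwpos]
      have h1 : i / width ≤ (n - 1) / width := Int.ediv_le_ediv hwpos (by omega)
      have h2 : (n + width - 1) / width = (n - 1) / width + 1 := by
        have : n + width - 1 = (n - 1) + 1 * width := by ring
        rw [this, Int.add_mul_ediv_right _ _ (by omega)]
      omega
  have hpermf : (ord.flatMap g).Perm (PySem.List.pyRange 0 n 1) :=
    (List.perm_ext_iff_of_nodup hndf (PySem.List.nodup_pyRange_one 0 n)).2 hmemf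
  rw [hA]
  exact (PySem.List.sorted_eq_of_perm_of_pairwise_lt _ _ key hpermf hpw).symm

-- ===== VERDICT (by name: the statement is the Claim_ definition above) =====
theorem columnar_perm_by_key_spec : Claim_equal_columnar_perm_by_key := by
  intro text col_key width _hdom hpre
  obtain ⟨hw, _hlen⟩ := hpre
  unfold Spec_columnar_perm_by_key columnar_perm_by_key columnar_perm_by_key_alt
  simp only []
  have hn : 0 ≤ PySem.Str.len text := by
    rw [PySem.Str.len_eq]; positivity
  exact pv_core (PySem.Str.len text) width _ hw hn
    (PySem.List.sorted_perm _ _ _)
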